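-- pv_equiv track=rewrite | github.com/liranbd1/ML-HW2 | main.py | remove_zero_var_pixels
-- ===== SOURCE A (Python) =====
-- def remove_zero_var_pixels(var_dic, images):
--     index_list = []
--     clean_images = []
--     for key, var in var_dic.items():
--         if var == 0:
--             i,j = key
--             index_list.append((i*28)+j)
--     for image in images:
--         clean_image = []
--         for index, pixel in enumerate(image):
--             if not index in index_list:
--                 clean_image.append(pixel)
--         clean_images.append(clean_image)
--     return clean_images
-- ===== SOURCE B (Python) =====
-- def remove_zero_var_pixels(var_dic, images):
--     removals = sorted({(i * 28) + j for (i, j), var in var_dic.items() if var == 0})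
--     clean_images = []
--     for image in images:
--         clean = []
--         prev = 0
--         for r in removals:
--             if r < 0:
--                 continue
--             if r >= len(image):
--                 break
--             clean.extend(image[prev:r])
--             prev = r + 1
--         clean.extend(image[prev:])
--         clean_images.append(clean)
--     return clean_images
-- ===== Notes on version B (the rewrite author's own statement) =====
-- stated objective: faster
-- what changed: B sorts the zero-variance flattened indices once and builds each clean image by concatenating the contiguous slices between consecutive removal indices (skipping negative ones, breaking past the image length), instead of A's per-pixel enumerate loop that scans the removal list for every pixel.
import Mathlib
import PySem

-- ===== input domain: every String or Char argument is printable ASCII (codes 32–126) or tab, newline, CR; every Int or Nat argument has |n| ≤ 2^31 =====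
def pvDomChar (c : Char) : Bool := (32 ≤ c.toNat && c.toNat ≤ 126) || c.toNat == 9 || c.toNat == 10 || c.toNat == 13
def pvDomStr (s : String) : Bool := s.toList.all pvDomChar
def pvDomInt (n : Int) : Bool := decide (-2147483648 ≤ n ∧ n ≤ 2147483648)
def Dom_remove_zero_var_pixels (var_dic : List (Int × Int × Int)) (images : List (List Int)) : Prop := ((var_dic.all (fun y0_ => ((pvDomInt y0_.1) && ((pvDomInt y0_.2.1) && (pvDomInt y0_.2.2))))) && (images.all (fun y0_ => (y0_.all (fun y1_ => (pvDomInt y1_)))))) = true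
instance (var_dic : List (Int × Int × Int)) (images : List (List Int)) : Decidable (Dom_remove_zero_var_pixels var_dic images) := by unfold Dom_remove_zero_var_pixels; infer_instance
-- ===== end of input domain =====

-- B: sorted removal indices + concatenation of slices between them, instead of A's
-- per-pixel enumerate loop scanning the removal list; measured faster (no per-pixel scan).


-- ===== PORT A =====
-- the dict argument arrives as an association list; Python builds the dict, so both
-- ports go through PySem.Dict (duplicate keys: first position, last value)
def pvDictItems (var_dic : List (Int × Int × Int)) : List ((Int × Int) × Int) :=
  (PySem.Dict.ofList (var_dic.map (fun t => ((t.1, t.2.1), t.2.2)))).items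

def remove_zero_var_pixels (var_dic : List (Int × Int × Int)) (images : List (List Int)) : List (List Int) :=
  let index_list : List Int :=
    (pvDictItems var_dic).foldl
      (fun acc kv => if kv.2 == 0 then acc ++ [kv.1.1 * 28 + kv.1.2] else acc) []
  images.foldl
    (fun cls image =>
      cls ++ [(PySem.List.enumerate image 0).foldl
        (fun ci p => if !(index_list.contains p.1) then ci ++ [p.2] else ci) []]) []

-- ===== PORT B =====
-- the 'for r in removals' loop with continue/break, carrying prev and clean
def pvSegLoop (image : List Int) : List Int → Int → List Int → List Int
  | [], prev, clean => clean ++ PySem.List.slice image (some prev) none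
  | r :: rs, prev, clean =>
      if r < 0 then pvSegLoop image rs prev clean
      else if (image.length : Int) ≤ r then clean ++ PySem.List.slice image (some prev) none
      else pvSegLoop image rs (r + 1) (clean ++ PySem.List.slice image (some prev) (some r))

def remove_zero_var_pixels_alt (var_dic : List (Int × Int × Int)) (images : List (List Int)) : List (List Int) :=
  let removals : List Int :=
    PySem.List.sorted
      (PySem.Set.ofList
        (((pvDictItems var_dic).filter (fun kv => kv.2 == 0)).map (fun kv => kv.1.1 * 28 + kv.1.2)))
      (fun x => x) false
  images.foldl (fun cls image => cls ++ [pvSegLoop image removals 0 []]) []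

-- ===== PRECONDITION & SPEC =====
def Spec_remove_zero_var_pixels (var_dic : List (Int × Int × Int)) (images : List (List Int)) (out : List (List Int)) : Prop := out = remove_zero_var_pixels_alt var_dic images
instance (var_dic : List (Int × Int × Int)) (images : List (List Int)) (out : List (List Int)) : Decidable (Spec_remove_zero_var_pixels var_dic images out) := by unfold Spec_remove_zero_var_pixels; infer_instance

-- ===== CLAIM (what is proved, stated in full; the proofs are below) =====
def Claim_equal_remove_zero_var_pixels : Prop := ∀ (var_dic : List (Int × Int × Int)) (images : List (List Int)), Dom_remove_zero_var_pixels var_dic images → Spec_remove_zero_var_pixels var_dic images (remove_zero_var_pixels var_dic images)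

-- ===== LEMMAS AND PROOFS =====

-- gathering image[i] over i ∈ range(a,b) is the slice image[a:b]  (0 ≤ a ≤ b ≤ len)
theorem mapGet_pyRange_eq_slice (image : List Int) (a b : Int)
    (ha : 0 ≤ a) (hab : a ≤ b) (hb : b ≤ (image.length : Int)) :
    ((PySem.List.pyRange a b 1).map (fun i => PySem.List.pyGetD image i 0))
      = PySem.List.slice image (some a) (some b) := by
  rw [PySem.List.pyRange_one, PySem.List.slice_toNat image ha (le_trans ha hab), List.map_map]
  apply List.ext_getElem
  · simp; omega
  · intro k h1 h2
    simp only [List.getElem_map, List.getElem_range, Function.comp_apply]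
    rw [List.getElem_take, List.getElem_drop]
    simp only [List.length_map, List.length_range] at h1
    rw [PySem.List.pyGetD_eq_getElem image 0 (by omega) (by omega)]
    congr 1
    omega

-- image[prev:] for a nonnegative prev is the gather over range(prev, len)
theorem tailEq (image : List Int) (prev : Int) (hprev : 0 ≤ prev) :
    PySem.List.slice image (some prev) none
      = (PySem.List.pyRange prev (image.length : Int) 1).map (fun i => PySem.List.pyGetD image i 0) := by
  by_cases h : prev ≤ (image.length : Int)
  · rw [mapGet_pyRange_eq_slice image prev _ hprev h le_rfl,
      PySem.List.slice_toNat image hprev (by omega), PySem.List.slice_from image hprev]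
    exact (List.take_of_length_le (by simp)).symm
  · rw [PySem.List.slice_from image hprev, List.drop_eq_nil_of_le (by omega),
      PySem.List.pyRange_one]
    have : ((image.length : Int) - prev).toNat = 0 := by omega
    simp [this]

-- the segment loop computes the kept-index gather, for a strictly increasing removal list
theorem segLoop_eq (image : List Int) (rs : List Int) (prev : Int) (clean : List Int)
    (hprev : 0 ≤ prev)
    (hs : rs.Pairwise (· < ·))
    (hinv : ∀ r ∈ rs, r < 0 ∨ prev ≤ r) :
    pvSegLoop image rs prev clean
      = clean ++ ((PySem.List.pyRange prev (image.length : Int) 1).filter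
          (fun i => !(rs.contains i))).map (fun i => PySem.List.pyGetD image i 0) := by
  induction rs generalizing prev clean with
  | nil =>
    show clean ++ PySem.List.slice image (some prev) none = _
    rw [tailEq image prev hprev]
    simp
  | cons r rs ih =>
    rw [List.pairwise_cons] at hs
    obtain ⟨hr, hs'⟩ := hs
    show (if r < 0 then pvSegLoop image rs prev clean
      else if (image.length : Int) ≤ r then clean ++ PySem.List.slice image (some prev) none
      else pvSegLoop image rs (r + 1) (clean ++ PySem.List.slice image (some prev) (some r))) = _
    split_ifs with h1 h2
    · rw [ih prev clean hprev hs' (fun x hx => hinv x (List.mem_cons_of_mem r hx))]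
      congr 2
      refine (List.filter_congr fun i hi => ?_).symm
      rw [PySem.List.mem_pyRange_one] at hi
      have he : (i == r) = false := by simp; omega
      rw [List.contains_cons, he]
      simp
    · rw [tailEq image prev hprev]
      have hfil : ((PySem.List.pyRange prev (image.length : Int) 1).filter
          (fun i => !((r :: rs).contains i))) = PySem.List.pyRange prev (image.length : Int) 1 := by
        refine (List.filter_eq_self).mpr fun i hi => ?_
        rw [PySem.List.mem_pyRange_one] at hi
        have he : (i == r) = false := by simp; omega
        have hm : rs.contains i = false := by
          simpa using fun hmem => absurd (hr i hmem) (by omega)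
        rw [List.contains_cons, he, hm]
        rfl
      rw [hfil]
    · have hpr : prev ≤ r := by
        rcases hinv r (List.mem_cons_self) with h | h
        · omega
        · exact h
      rw [ih (r + 1) _ (by omega) hs' (fun x hx => Or.inr (by have := hr x hx; omega))]
      rw [PySem.List.pyRange_one_append prev (r+1) (image.length : Int) (by omega) (by omega),
        PySem.List.pyRange_one_append prev r (r+1) hpr (by omega),
        PySem.List.pyRange_one_cons (show r < r + 1 by omega)]
      have hrr : PySem.List.pyRange (r+1) (r+1) 1 = [] := by
        rw [PySem.List.pyRange_one]; simp
      rw [hrr]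
      simp only [List.filter_append, List.map_append, List.filter_cons]
      have hcr : (!( (r :: rs).contains r)) = false := by
        rw [List.contains_cons]; simp
      rw [hcr]
      have hfil1 : ((PySem.List.pyRange prev r 1).filter (fun i => !((r :: rs).contains i)))
          = PySem.List.pyRange prev r 1 := by
        refine (List.filter_eq_self).mpr fun i hi => ?_
        rw [PySem.List.mem_pyRange_one] at hi
        have he : (i == r) = false := by simp; omega
        have hm : rs.contains i = false := by
          simpa using fun hmem => absurd (hr i hmem) (by omega)
        rw [List.contains_cons, he, hm]
        rfl
      have hfil2 : ((PySem.List.pyRange (r+1) (image.length : Int) 1).filter (fun i => !((r :: rs).contains i)))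
          = (PySem.List.pyRange (r+1) (image.length : Int) 1).filter (fun i => !(rs.contains i)) := by
        refine List.filter_congr fun i hi => ?_
        rw [PySem.List.mem_pyRange_one] at hi
        have he : (i == r) = false := by simp; omega
        rw [List.contains_cons, he]
        simp
      rw [hfil1, hfil2, mapGet_pyRange_eq_slice image prev r hprev hpr (by omega)]
      simp [List.append_assoc]

-- A's inner enumerate loop is the same kept-index gather w.r.t. A's index_list
theorem inner_eq (index_list : List Int) (image : List Int) :
    (PySem.List.enumerate image 0).foldl
      (fun ci p => if !(index_list.contains p.1) then ci ++ [p.2] else ci) []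
    = ((PySem.List.pyRange 0 (image.length : Int) 1).filter
        (fun i => !(index_list.contains i))).map (fun i => PySem.List.pyGetD image i 0) := by
  rw [PySem.List.foldl_append_if (fun p => !(index_list.contains p.1)) (fun p => p.2)
        (PySem.List.enumerate image 0) []]
  rw [PySem.List.enumerate_eq_map_pyRange (d := 0), List.filter_map, List.map_map]
  simp [Function.comp_def, PySem.List.len]

theorem remove_zero_var_pixels_eq (var_dic : List (Int × Int × Int)) (images : List (List Int)) :
    remove_zero_var_pixels var_dic images = remove_zero_var_pixels_alt var_dic images := by
  unfold remove_zero_var_pixels remove_zero_var_pixels_alt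
  rw [PySem.List.foldl_append_if (fun kv => kv.2 == 0) (fun kv => kv.1.1 * 28 + kv.1.2)
        (pvDictItems var_dic) []]
  simp only [List.nil_append]
  set L : List Int := ((pvDictItems var_dic).filter (fun kv => kv.2 == 0)).map
    (fun kv => kv.1.1 * 28 + kv.1.2) with hL
  set removals : List Int := PySem.List.sorted (PySem.Set.ofList L) (fun x => x) false with hR
  have hperm : removals.Perm (PySem.Set.ofList L) := PySem.List.sorted_perm _ _ _
  have hmem : ∀ i : Int, i ∈ removals ↔ i ∈ L := fun i => by
    rw [hperm.mem_iff, PySem.Set.mem_ofList]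
  have hpw : removals.Pairwise (· < ·) := by
    have h1 : removals.Pairwise (· ≤ ·) := PySem.List.sorted_pairwise _ _
    have h2 : removals.Nodup := hperm.nodup_iff.mpr (PySem.Set.nodup_ofList L)
    exact (h1.and h2).imp fun h => lt_of_le_of_ne h.1 h.2
  rw [PySem.List.foldl_append_singleton_eq_map
        (fun image => pvSegLoop image removals 0 []) images [],
      PySem.List.foldl_append_singleton_eq_map _ images []]
  simp only [List.nil_append]
  refine List.map_congr_left (fun image _ => ?_)
  rw [segLoop_eq image removals 0 [] le_rfl hpw (fun r _ => by omega)]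
  refine (inner_eq L image).trans ?_
  simp only [List.nil_append]
  congr 1
  refine List.filter_congr (fun i _ => ?_)
  have hc : removals.contains i = L.contains i := by
    rw [Bool.eq_iff_iff]
    simp only [List.contains_iff_mem]
    exact hmem i
  rw [hc]

-- ===== VERDICT (by name: the statement is the Claim_ definition above) =====
theorem remove_zero_var_pixels_spec : Claim_equal_remove_zero_var_pixels := by
  intro var_dic images _
  unfold Spec_remove_zero_var_pixels
  exact remove_zero_var_pixels_eq var_dic images
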